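-- pv_equiv track=rewrite | github.com/SidRichardsQuantum/Variational_Quantum_Eigensolver | vqe/ssvqe.py | _default_reference_states
-- ===== SOURCE A (Python) =====
-- from typing import Callable, List, Optional, Sequence
--
-- def _default_reference_states(num_states: int, num_wires: int) -> List[List[int]]:
--     """
--     Default orthogonal computational-basis reference states:
--         |0...0>, |0...01>, |0...10>, ...
--
--     Note: for chemistry, you will usually want HF + excitations instead.
--     """
--     if num_states < 1:
--         raise ValueError("num_states must be >= 1")
--     if num_states > 2**num_wires:
--         raise ValueError(
--             f"num_states={num_states} exceeds Hilbert space size 2**{num_wires}"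
--         )
--
--     states: List[List[int]] = []
--     for k in range(num_states):
--         bits = [(k >> (num_wires - 1 - i)) & 1 for i in range(num_wires)]
--         states.append(bits)
--     return states
-- ===== SOURCE B (Python) =====
-- from typing import List
--
-- def _default_reference_states(num_states: int, num_wires: int) -> List[List[int]]:
--     if num_states < 1:
--         raise ValueError("num_states must be >= 1")
--     if num_states > 2**num_wires:
--         raise ValueError(
--             f"num_states={num_states} exceeds Hilbert space size 2**{num_wires}"
--         )
--
--     states: List[List[int]] = []
--     bits = [0] * num_wires
--     for _ in range(num_states):
--         states.append(bits.copy())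
--         # ripple-carry increment of the binary counter (least-significant bit last)
--         j = num_wires - 1
--         while j >= 0 and bits[j] == 1:
--             bits[j] = 0
--             j -= 1
--         if j >= 0:
--             bits[j] = 1
--     return states
-- ===== Notes on version B (the rewrite author's own statement) =====
-- stated objective: faster
-- what changed: Replaces per-state shift/mask extraction of every bit of the index k by a single ripple-carry binary counter that is copied and incremented in place once per state, so most bits are reused instead of recomputed.
import Mathlib
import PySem

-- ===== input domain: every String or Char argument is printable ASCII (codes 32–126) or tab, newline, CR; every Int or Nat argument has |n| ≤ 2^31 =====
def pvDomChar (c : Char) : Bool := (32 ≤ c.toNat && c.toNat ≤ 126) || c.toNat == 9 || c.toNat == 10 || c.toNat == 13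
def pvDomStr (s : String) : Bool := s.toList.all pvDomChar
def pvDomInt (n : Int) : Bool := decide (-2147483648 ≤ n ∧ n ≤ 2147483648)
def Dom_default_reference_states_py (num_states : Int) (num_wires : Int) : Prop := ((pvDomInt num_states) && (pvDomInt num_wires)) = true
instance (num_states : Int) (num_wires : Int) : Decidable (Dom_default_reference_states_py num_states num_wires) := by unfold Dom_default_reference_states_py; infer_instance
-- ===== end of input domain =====

-- B runs a single ripple-carry binary counter, copied once per state, instead of
-- re-extracting every bit of each index k by shift/mask.

-- ===== PORT A =====
-- for k in range(num_states): bits = [(k >> (num_wires-1-i)) & 1 for i in range(num_wires)]; states.append(bits)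
-- (the shift amount num_wires-1-i is nonnegative for every i in range(num_wires), so .toNat is exact there)
def default_reference_states_py (num_states : Int) (num_wires : Int) : List (List Int) :=
  (PySem.List.pyRange 0 num_states 1).foldl
    (fun (states : List (List Int)) (k : Int) =>
      states ++ [(PySem.List.pyRange 0 num_wires 1).map
        (fun i => PySem.Int.band (k >>> (num_wires - 1 - i).toNat) 1)])
    []

-- ===== PORT B =====
-- Source B's ripple-carry increment: the while loop scans bits from index num_wires-1 downward,
-- clearing trailing 1s and setting the first 0; on the reversed list that is this head-first ripple
def pvIncRev : List Int → List Int
  | [] => []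
  | b :: t => if b == 1 then 0 :: pvIncRev t else 1 :: t

-- Source B's for-loop: append a copy of the counter, then increment it, num_states times
def pvLoop (cnt : Nat) (bits : List Int) (states : List (List Int)) : List (List Int) :=
  match cnt with
  | 0 => states
  | c + 1 => pvLoop c ((pvIncRev bits.reverse).reverse) (states ++ [bits])

def default_reference_states_py_alt (num_states : Int) (num_wires : Int) : List (List Int) :=
  pvLoop num_states.toNat (List.replicate num_wires.toNat 0) []

-- ===== PRECONDITION & SPEC =====
-- Pre_ excludes exactly the inputs where A raises ValueError (num_states < 1, or num_states > 2**num_wires;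
-- for negative num_wires 2**num_wires < 1 ≤ num_states, so A always raises there too).
def Pre_default_reference_states_py (num_states : Int) (num_wires : Int) : Prop :=
  1 ≤ num_states ∧ 0 ≤ num_wires ∧ num_states ≤ (2 : Int) ^ num_wires.toNat
instance (num_states : Int) (num_wires : Int) : Decidable (Pre_default_reference_states_py num_states num_wires) := by unfold Pre_default_reference_states_py; infer_instance
def pvWitness_default_reference_states_py : Int × Int := (3, 2)

def Spec_default_reference_states_py (num_states : Int) (num_wires : Int) (out : List (List Int)) : Prop := out = default_reference_states_py_alt num_states num_wires
instance (num_states : Int) (num_wires : Int) (out : List (List Int)) : Decidable (Spec_default_reference_states_py num_states num_wires out) := by unfold Spec_default_reference_states_py; infer_instance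

-- ===== CLAIM (what is proved, stated in full; the proofs are below) =====
def Claim_equal_default_reference_states_py : Prop := ∀ (num_states : Int) (num_wires : Int), Dom_default_reference_states_py num_states num_wires → Pre_default_reference_states_py num_states num_wires → Spec_default_reference_states_py num_states num_wires (default_reference_states_py num_states num_wires)

-- ===== LEMMAS AND PROOFS =====

-- the bit list A computes for state k of width n, in Nat arithmetic
def pvBits (n k : Nat) : List Int :=
  (List.range n).map (fun i => ((k / 2 ^ (n - 1 - i)) % 2 : Nat))

-- low-to-high bit list of k, the reverse of pvBits
def pvLow (n k : Nat) : List Int :=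
  (List.range n).map (fun j => ((k / 2 ^ j) % 2 : Nat))

theorem pvLow_reverse (n k : Nat) : (pvLow n k).reverse = pvBits n k := by
  apply List.ext_getElem
  · simp [pvLow, pvBits]
  · intro i h1 h2
    simp only [pvLow, pvBits, List.getElem_reverse, List.getElem_map, List.getElem_range,
      List.length_map, List.length_range] at *

theorem pvLow_succ (n k : Nat) : pvLow (n + 1) k = ((k % 2 : Nat) : Int) :: pvLow n (k / 2) := by
  unfold pvLow
  rw [List.range_succ_eq_map, List.map_cons, List.map_map]
  congr 1
  · simp
  · apply List.map_congr_left
    intro j hj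
    simp only [Function.comp, Nat.succ_eq_add_one]
    rw [Nat.div_div_eq_div_mul, pow_succ']

-- the ripple-carry increment adds one to the counter value
theorem pvIncRev_low {n k : Nat} (h : k + 1 < 2 ^ n) :
    pvIncRev (pvLow n k) = pvLow n (k + 1) := by
  induction n generalizing k with
  | zero => omega
  | succ n ih =>
    have hp : (2:Nat) ^ (n+1) = 2 ^ n + 2 ^ n := by ring
    rw [pvLow_succ, pvLow_succ]
    by_cases ho : k % 2 = 1
    · rw [pvIncRev, if_pos (by simp [ho]), ih (by omega)]
      have e1 : (k + 1) % 2 = 0 := by omega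
      have e2 : (k + 1) / 2 = k / 2 + 1 := by omega
      rw [e1, e2]
      simp
    · rw [pvIncRev, if_neg (by simp; omega)]
      have e1 : (k + 1) % 2 = 1 := by omega
      have e2 : (k + 1) / 2 = k / 2 := by omega
      rw [e1, e2]
      norm_num

-- B's loop, started at counter value k, emits the bit lists of k, k+1, …, k+c-1
theorem pvLoop_eq (n : Nat) (c k : Nat) (acc : List (List Int)) (h : k + c ≤ 2 ^ n) :
    pvLoop c ((pvLow n k).reverse) acc = acc ++ (List.range' k c).map (pvBits n) := by
  induction c generalizing k acc with
  | zero => simp [pvLoop]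
  | succ c ih =>
    rw [pvLoop, List.reverse_reverse]
    by_cases hc : c = 0
    · subst hc
      rw [pvLoop]
      simp [pvLow_reverse, List.range'_one]
    · rw [pvIncRev_low (by omega), ih (k + 1) _ (by omega), pvLow_reverse]
      rw [List.range'_succ, List.map_cons]
      simp

-- A's inner comprehension for a fixed state k equals pvBits
theorem portA_bits (n k : Nat) :
    (PySem.List.pyRange 0 (n : Int) 1).map
        (fun i => PySem.Int.band (((k : Int)) >>> (((n : Int) - 1 - i).toNat)) 1)
      = pvBits n k := by
  rw [PySem.List.pyRange_zero_natCast, List.map_map]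
  apply List.map_congr_left
  intro i hi
  simp only [List.mem_range] at hi
  simp only [Function.comp]
  have he : (((n:Int) - 1 - (i:Int)).toNat) = n - 1 - i := by omega
  rw [he]
  have hsh : ((k:Int)) >>> (n - 1 - i) = ((k >>> (n - 1 - i) : Nat) : Int) := by simp
  rw [hsh]
  have hband : PySem.Int.band ((k >>> (n - 1 - i) : Nat) : Int) 1 = (((k >>> (n-1-i)) &&& 1 : Nat) : Int) := by
    exact_mod_cast PySem.Int.band_natCast (k >>> (n-1-i)) 1
  rw [hband, Nat.and_one_is_mod, Nat.shiftRight_eq_div_pow]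

-- ===== VERDICT (by name: the statement is the Claim_ definition above) =====
theorem default_reference_states_py_spec : Claim_equal_default_reference_states_py := by
  intro num_states num_wires _ hpre
  obtain ⟨h1, h2, h3⟩ := hpre
  unfold Spec_default_reference_states_py
  obtain ⟨m, rfl⟩ : ∃ m : Nat, num_states = (m : Int) := ⟨num_states.toNat, by omega⟩
  obtain ⟨n, rfl⟩ : ∃ n : Nat, num_wires = (n : Int) := ⟨num_wires.toNat, by omega⟩
  simp only [Int.toNat_natCast] at h3
  unfold default_reference_states_py default_reference_states_py_alt
  rw [PySem.List.foldl_append_singleton_eq_map, List.nil_append]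
  rw [PySem.List.pyRange_zero_natCast, PySem.List.pyRange_zero_natCast, List.map_map,
    Int.toNat_natCast, Int.toNat_natCast]
  have hrep : List.replicate n (0 : Int) = (pvLow n 0).reverse := by
    simp [pvLow, List.map_const', List.reverse_replicate]
  rw [hrep, pvLoop_eq n m 0 [] (by rw [Nat.zero_add]; exact_mod_cast h3), List.nil_append,
    ← List.range_eq_range']
  apply List.map_congr_left
  intro k hk
  simp only [Function.comp]
  rw [← PySem.List.pyRange_zero_natCast]
  exact portA_bits n k
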